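-- pv_equiv track=rewrite | github.com/poojamaskare/HireReady-2.0 | services/feature_analyzer.py | _clean_leetcode_username
-- ===== SOURCE A (Python) =====
-- def _clean_leetcode_username(raw: str) -> str:
--     """
--     Extract a plain LeetCode username from user input.
--     Handles:  'aadesh'
--               'https://leetcode.com/u/aadesh/'
--               'https://leetcode.com/aadesh/'
--               'leetcode.com/u/aadesh'
--     """
--     raw = raw.strip().rstrip("/")
--     # Strip common LeetCode URL prefixes
--     for prefix in ["https://leetcode.com/u/", "https://leetcode.com/",
--                     "http://leetcode.com/u/", "http://leetcode.com/",
--                     "leetcode.com/u/", "leetcode.com/"]: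
--         if raw.lower().startswith(prefix):
--             raw = raw[len(prefix):]
--             break
--     # Take only the first path segment
--     return raw.split("/")[0].strip()
-- ===== SOURCE B (Python) =====
-- def _clean_leetcode_username(raw: str) -> str:
--     # Peel the URL stepwise (optional scheme, mandatory 'leetcode.com/', optional 'u/')
--     # instead of testing six precomposed prefixes.
--     s = raw.strip().rstrip("/")
--     low = s.lower()
--     rest = low
--     n = 0
--     for scheme in ("https://", "http://"):
--         if rest.startswith(scheme):
--             rest = rest[len(scheme):]
--             n = len(scheme)
--             break
--     if rest.startswith("leetcode.com/"):
--         n += len("leetcode.com/")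
--         if rest[len("leetcode.com/"):].startswith("u/"):
--             n += 2
--     else:
--         n = 0
--     return s[n:].split("/")[0].strip()
-- ===== Notes on version B (the rewrite author's own statement) =====
-- stated objective: alternative
-- what changed: B replaces A's ordered scan over six precomposed URL prefixes by a stepwise peel (optional scheme, then mandatory 'leetcode.com/', then optional 'u/'), computing one drop offset.
import Mathlib
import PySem

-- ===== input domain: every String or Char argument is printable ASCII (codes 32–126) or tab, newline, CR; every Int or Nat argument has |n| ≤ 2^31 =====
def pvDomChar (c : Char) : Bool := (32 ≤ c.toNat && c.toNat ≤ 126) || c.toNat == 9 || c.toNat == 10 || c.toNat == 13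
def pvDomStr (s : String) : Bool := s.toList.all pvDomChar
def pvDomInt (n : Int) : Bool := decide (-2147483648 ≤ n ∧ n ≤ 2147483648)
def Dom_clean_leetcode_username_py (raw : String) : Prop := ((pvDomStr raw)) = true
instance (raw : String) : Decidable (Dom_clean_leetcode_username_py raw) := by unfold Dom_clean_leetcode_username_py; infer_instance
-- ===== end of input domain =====

-- B peels the URL stepwise (optional scheme, then 'leetcode.com/', then optional 'u/')
-- instead of A's ordered scan over six precomposed prefixes; equivalence proved on all inputs.

-- shared primitive: s.rstrip("/") (PySem has no chars-argument rstrip); exact: drops trailing '/' only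
def cluRstripSlash (cs : List Char) : List Char :=
  (cs.reverse.dropWhile (fun c => c == '/')).reverse

-- ===== PORT A =====
-- the six prefixes, in A's order
def cluPrefixes : List (List Char) :=
  ["https://leetcode.com/u/".toList, "https://leetcode.com/".toList,
   "http://leetcode.com/u/".toList, "http://leetcode.com/".toList,
   "leetcode.com/u/".toList, "leetcode.com/".toList]

-- the for-loop: first prefix of raw.lower() wins, raw[len(prefix):] (slice from a Nat = drop), break
def cluLoop (s : List Char) : List (List Char) → List Char
  | [] => s
  | p :: ps =>
    if PySem.Chars.startswith (PySem.Chars.lower s) p then s.drop p.length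
    else cluLoop s ps

def clean_leetcode_username_py (raw : String) : String :=
  let s := cluRstripSlash (PySem.Chars.strip raw.toList)
  let s2 := cluLoop s cluPrefixes
  -- raw.split("/")[0] : split with a nonempty separator is never empty, so [0] is headD
  String.ofList (PySem.Chars.strip ((PySem.Chars.splitOn s2 ['/']).headD []))

-- ===== PORT B =====
-- Source B's offset computation: scheme loop, then 'leetcode.com/', then optional 'u/'
def cluAltN (low : List Char) : Nat :=
  let rn : List Char × Nat :=
    if PySem.Chars.startswith low "https://".toList then (low.drop 8, 8)
    else if PySem.Chars.startswith low "http://".toList then (low.drop 7, 7)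
    else (low, 0)
  if PySem.Chars.startswith rn.1 "leetcode.com/".toList then
    if PySem.Chars.startswith (rn.1.drop 13) "u/".toList then rn.2 + 13 + 2 else rn.2 + 13
  else 0

def clean_leetcode_username_py_alt (raw : String) : String :=
  let s := cluRstripSlash (PySem.Chars.strip raw.toList)
  let n := cluAltN (PySem.Chars.lower s)
  String.ofList (PySem.Chars.strip ((PySem.Chars.splitOn (s.drop n) ['/']).headD []))

-- ===== PRECONDITION & SPEC =====
def Spec_clean_leetcode_username_py (raw : String) (out : String) : Prop := out = clean_leetcode_username_py_alt raw
instance (raw : String) (out : String) : Decidable (Spec_clean_leetcode_username_py raw out) := by unfold Spec_clean_leetcode_username_py; infer_instance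

-- ===== CLAIM (what is proved, stated in full; the proofs are below) =====
def Claim_equal_clean_leetcode_username_py : Prop := ∀ (raw : String), Dom_clean_leetcode_username_py raw → Spec_clean_leetcode_username_py raw (clean_leetcode_username_py raw)

-- ===== LEMMAS AND PROOFS =====

-- a concatenation is a prefix iff each part is a prefix of the corresponding remainder
theorem clu_prefix_append (a b l : List Char) :
    (a ++ b) <+: l ↔ a <+: l ∧ b <+: l.drop a.length := by
  induction a generalizing l with
  | nil => simp
  | cons x a ih =>
    cases l with
    | nil => simp
    | cons y l =>
      simp [List.cons_prefix_cons, ih, and_assoc]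

theorem clu_startswith_append (l a b : List Char) :
    PySem.Chars.startswith l (a ++ b)
      = (PySem.Chars.startswith l a && PySem.Chars.startswith (l.drop a.length) b) := by
  rw [Bool.eq_iff_iff]
  simp only [Bool.and_eq_true, PySem.Chars.startswith_iff]
  exact clu_prefix_append a b l

-- two incomparable literal prefixes cannot both be prefixes of the same string
theorem clu_excl {a b l : List Char} (hlen : a.length ≤ b.length) (hab : ¬ a <+: b)
    (ha : PySem.Chars.startswith l a = true) (hb : PySem.Chars.startswith l b = true) : False :=
  hab (List.prefix_of_prefix_length_le ((PySem.Chars.startswith_iff _ _).mp ha)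
    ((PySem.Chars.startswith_iff _ _).mp hb) hlen)

-- the core fact: A's six-prefix loop drops exactly B's offset
theorem clu_loop_eq (s : List Char) :
    cluLoop s cluPrefixes = s.drop (cluAltN (PySem.Chars.lower s)) := by
  have e1 : "https://leetcode.com/u/".toList
      = "https://".toList ++ ("leetcode.com/".toList ++ "u/".toList) := by decide
  have e2 : "https://leetcode.com/".toList = "https://".toList ++ "leetcode.com/".toList := by decide
  have e3 : "http://leetcode.com/u/".toList
      = "http://".toList ++ ("leetcode.com/".toList ++ "u/".toList) := by decide
  have e4 : "http://leetcode.com/".toList = "http://".toList ++ "leetcode.com/".toList := by decide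
  have e5 : "leetcode.com/u/".toList = "leetcode.com/".toList ++ "u/".toList := by decide
  have lenS : ("https://".toList).length = 8 := by decide
  have lenT : ("http://".toList).length = 7 := by decide
  have lenL : ("leetcode.com/".toList).length = 13 := by decide
  have lenU : ("u/".toList).length = 2 := by decide
  simp only [cluLoop, cluPrefixes, cluAltN, e1, e2, e3, e4, e5, clu_startswith_append,
    List.drop_drop, lenS, lenT, lenL, Nat.reduceAdd]
  set l := PySem.Chars.lower s with hl
  by_cases hS : PySem.Chars.startswith l "https://".toList
  · have hT : PySem.Chars.startswith l "http://".toList = false := by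
      rcases h : PySem.Chars.startswith l "http://".toList with _ | _
      · rfl
      · exact absurd (clu_excl (by decide) (by decide) h hS) (by simp)
    have hL0 : PySem.Chars.startswith l "leetcode.com/".toList = false := by
      rcases h : PySem.Chars.startswith l "leetcode.com/".toList with _ | _
      · rfl
      · exact absurd (clu_excl (by decide) (by decide) hS h) (by simp)
    rcases hL : PySem.Chars.startswith (l.drop 8) "leetcode.com/".toList with _ | _ <;>
      rcases hU : PySem.Chars.startswith (l.drop 21) "u/".toList with _ | _ <;>
        simp only [hS, hT, hL0, hL, hU, Bool.false_and, Bool.and_true,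
            Bool.and_false, List.drop_drop, List.length_append, lenS, lenT, lenL, lenU,
            Nat.reduceAdd, List.drop_zero, Bool.false_eq_true, if_false, if_true]
  · have hS' : PySem.Chars.startswith l "https://".toList = false := by
      rcases h : PySem.Chars.startswith l "https://".toList with _ | _
      · rfl
      · exact absurd h hS
    by_cases hT : PySem.Chars.startswith l "http://".toList
    · have hL0 : PySem.Chars.startswith l "leetcode.com/".toList = false := by
        rcases h : PySem.Chars.startswith l "leetcode.com/".toList with _ | _
        · rfl
        · exact absurd (clu_excl (by decide) (by decide) hT h) (by simp)
      rcases hL : PySem.Chars.startswith (l.drop 7) "leetcode.com/".toList with _ | _ <;>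
        rcases hU : PySem.Chars.startswith (l.drop 20) "u/".toList with _ | _ <;>
          simp only [hS', hT, hL0, hL, hU, Bool.false_and, Bool.and_true,
            Bool.and_false, List.drop_drop, List.length_append, lenS, lenT, lenL, lenU,
            Nat.reduceAdd, List.drop_zero, Bool.false_eq_true, if_false, if_true]
    · have hT' : PySem.Chars.startswith l "http://".toList = false := by
        rcases h : PySem.Chars.startswith l "http://".toList with _ | _
        · rfl
        · exact absurd h hT
      rcases hL : PySem.Chars.startswith l "leetcode.com/".toList with _ | _ <;>
        rcases hU : PySem.Chars.startswith (l.drop 13) "u/".toList with _ | _ <;>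
          simp only [hS', hT', hL, hU, Bool.false_and, Bool.and_true,
            Bool.and_false, List.length_append, lenS, lenT, lenL, lenU,
            Nat.reduceAdd, List.drop_zero, Bool.false_eq_true, if_false, if_true]

-- ===== VERDICT (by name: the statement is the Claim_ definition above) =====
theorem clean_leetcode_username_py_spec : Claim_equal_clean_leetcode_username_py := by
  intro raw _
  show _ = _
  simp only [clean_leetcode_username_py, clean_leetcode_username_py_alt, clu_loop_eq]
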